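-- pv_equiv track=rewrite | github.com/AndreiZherder/algorithms-and-data-structures | 8.2-longest-nonincreasing-subsequence-1.py | reversed_bisect_left
-- ===== SOURCE A (Python) =====
-- from typing import List
--
-- def reversed_bisect_left(a: List[int], num: int) -> int:
--     left = 0
--     right = len(a) - 1
--     while left <= right:
--         middle = left + (right - left) // 2
--         if num < a[middle]:
--             left = middle + 1
--         else:
--             right = middle - 1
--     return left
-- ===== SOURCE B (Python) =====
-- def reversed_bisect_left(a, num):
--     for i, x in enumerate(a):
--         if not (num < x):
--             return i
--     return len(a)
-- ===== Notes on version B (the rewrite author's own statement) =====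
-- stated objective: simpler
-- what changed: Replaced the binary search with a single forward scan that returns the first index i with a[i] <= num (the length of the leading prefix of elements strictly greater than num).
-- outside the precondition, e.g. on reversed_bisect_left([0, 5, 0], 4): A returns 2, B returns 0
import Mathlib
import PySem

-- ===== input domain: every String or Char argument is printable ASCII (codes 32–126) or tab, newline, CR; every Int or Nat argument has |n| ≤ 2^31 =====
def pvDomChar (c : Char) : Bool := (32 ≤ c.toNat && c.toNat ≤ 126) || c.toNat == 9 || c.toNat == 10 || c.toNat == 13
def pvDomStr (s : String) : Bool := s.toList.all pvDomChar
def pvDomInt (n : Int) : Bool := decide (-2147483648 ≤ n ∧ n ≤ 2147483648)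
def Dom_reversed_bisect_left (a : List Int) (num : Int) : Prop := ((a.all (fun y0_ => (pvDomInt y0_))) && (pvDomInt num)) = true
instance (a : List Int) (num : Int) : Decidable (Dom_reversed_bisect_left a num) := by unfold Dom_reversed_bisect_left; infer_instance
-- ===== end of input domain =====

-- B replaces the binary search by a plain forward scan for the first index with a[i] ≤ num (simpler, not faster).

-- ===== PORT A =====
-- the while loop of A; 'middle' is a pure expression, inlined at its three uses.
-- indexing is pyGetD: the loop's invariants keep 'middle' in range, so the default is never consulted.
def bsLoopA (a : List Int) (num left right : Int) : Int :=
  if left ≤ right then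
    if num < PySem.List.pyGetD a (left + PySem.Int.floordiv (right - left) 2) 0 then
      bsLoopA a num (left + PySem.Int.floordiv (right - left) 2 + 1) right
    else
      bsLoopA a num left (left + PySem.Int.floordiv (right - left) 2 - 1)
  else left
termination_by (right + 1 - left).toNat
decreasing_by
  all_goals rw [PySem.Int.floordiv_eq_ediv_of_pos (by norm_num)] at *
  all_goals omega

def reversed_bisect_left (a : List Int) (num : Int) : Int :=
  bsLoopA a num 0 ((a.length : Int) - 1)

-- ===== PORT B =====
-- for i, x in enumerate(a): if not (num < x): return i;  return len(a)
def scanB (num i : Int) : List Int → Int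
  | [] => i
  | x :: xs => if num < x then scanB num (i + 1) xs else i

def reversed_bisect_left_alt (a : List Int) (num : Int) : Int :=
  scanB num 0 a

-- ===== PRECONDITION & SPEC =====
-- Pre_ requires the comparison num < a[j] to be true on a prefix and false on the rest of a
-- (i.e. a is partitioned w.r.t. num; any non-increasing a qualifies) — the domain on which a
-- bisection is meaningful; elsewhere A's binary-search answer and B's scan answer are both
-- unspecified-corner choices.
def Pre_reversed_bisect_left (a : List Int) (num : Int) : Prop :=
  List.Pairwise (fun x y => num < y → num < x) a

instance (a : List Int) (num : Int) : Decidable (Pre_reversed_bisect_left a num) := by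
  unfold Pre_reversed_bisect_left; infer_instance

def pvWitness_reversed_bisect_left : List Int × Int := ([9, 5, 5, 2, -3], 5)

def Spec_reversed_bisect_left (a : List Int) (num : Int) (out : Int) : Prop := out = reversed_bisect_left_alt a num
instance (a : List Int) (num : Int) (out : Int) : Decidable (Spec_reversed_bisect_left a num out) := by unfold Spec_reversed_bisect_left; infer_instance

-- ===== CLAIM (what is proved, stated in full; the proofs are below) =====
def Claim_equal_reversed_bisect_left : Prop := ∀ (a : List Int) (num : Int), Dom_reversed_bisect_left a num → Pre_reversed_bisect_left a num → Spec_reversed_bisect_left a num (reversed_bisect_left a num)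

-- ===== LEMMAS AND PROOFS =====

-- the characterisation both ports satisfy: i splits a into a strict-> prefix and a ≤ suffix
def IsIns (a : List Int) (num i : Int) : Prop :=
  0 ≤ i ∧ i ≤ (a.length : Int) ∧
  (∀ j : Nat, (j : Int) < i → num < a.getD j 0) ∧
  (∀ j : Nat, i ≤ (j : Int) → j < a.length → ¬ num < a.getD j 0)

theorem isIns_unique (a : List Int) (num : Int) {i i' : Int}
    (h : IsIns a num i) (h' : IsIns a num i') : i = i' := by
  obtain ⟨h0, hn, hp, hs⟩ := h
  obtain ⟨h0', hn', hp', hs'⟩ := h'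
  by_contra hne
  rcases lt_or_gt_of_ne hne with hlt | hlt
  · exact hs i.toNat (by omega) (by omega) (hp' i.toNat (by omega))
  · exact hs' i'.toNat (by omega) (by omega) (hp i'.toNat (by omega))

theorem mono_getD (a : List Int) (num : Int)
    (hs : List.Pairwise (fun x y => num < y → num < x) a)
    {j k : Nat} (hjk : j ≤ k) (hk : k < a.length)
    (h : num < a.getD k 0) : num < a.getD j 0 := by
  rcases eq_or_lt_of_le hjk with rfl | hjk'
  · exact h
  · rw [List.getD_eq_getElem a 0 hk] at h
    rw [List.getD_eq_getElem a 0 (lt_trans hjk' hk)]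
    exact List.pairwise_iff_getElem.mp hs j k (lt_trans hjk' hk) hk hjk' h

theorem bsLoopA_isIns (a : List Int) (num : Int)
    (hs : List.Pairwise (fun x y => num < y → num < x) a) :
    ∀ (n : Nat) (left right : Int), (right + 1 - left).toNat ≤ n →
      0 ≤ left → right < (a.length : Int) → left ≤ right + 1 →
      (∀ j : Nat, (j : Int) < left → num < a.getD j 0) →
      (∀ j : Nat, right < (j : Int) → j < a.length → ¬ num < a.getD j 0) →
      IsIns a num (bsLoopA a num left right) := by
  intro n
  induction n with
  | zero =>
    intro left right hfuel h0 hr hlr hp hsuf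
    have hgt : ¬ left ≤ right := by omega
    rw [bsLoopA, if_neg hgt]
    exact ⟨h0, by omega, hp, fun j hj hjl => hsuf j (by omega) hjl⟩
  | succ n ih =>
    intro left right hfuel h0 hr hlr hp hsuf
    by_cases hle : left ≤ right
    · have hfd : PySem.Int.floordiv (right - left) 2 = (right - left) / 2 :=
        PySem.Int.floordiv_eq_ediv_of_pos (by norm_num)
      rw [bsLoopA, if_pos hle, hfd]
      have hmb : left ≤ left + (right - left) / 2 ∧ left + (right - left) / 2 ≤ right := by omega
      have hmlen : (left + (right - left) / 2).toNat < a.length := by omega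
      have hget : PySem.List.pyGetD a (left + (right - left) / 2) 0
          = a.getD (left + (right - left) / 2).toNat 0 := by
        rw [PySem.List.pyGetD_eq_getElem a 0 (by omega) (by omega),
            List.getD_eq_getElem a 0 hmlen]
      by_cases hcmp : num < PySem.List.pyGetD a (left + (right - left) / 2) 0
      · rw [if_pos hcmp]
        refine ih (left + (right - left) / 2 + 1) right (by omega) (by omega) hr (by omega) ?_ hsuf
        intro j hj
        have hjm : j ≤ (left + (right - left) / 2).toNat := by omega
        refine mono_getD a num hs hjm hmlen ?_
        rw [← hget]; exact hcmp
      · rw [if_neg hcmp]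
        refine ih left (left + (right - left) / 2 - 1) (by omega) h0 (by omega) (by omega) hp ?_
        intro j hj hjl
        have hmj : (left + (right - left) / 2).toNat ≤ j := by omega
        intro hlt
        rw [hget] at hcmp
        exact hcmp (mono_getD a num hs hmj hjl hlt)
    · rw [bsLoopA, if_neg hle]
      exact ⟨h0, by omega, hp, fun j hj hjl => hsuf j (by omega) hjl⟩

-- B's scan adds the length of the strict-> leading prefix to its accumulator
theorem scanB_eq (num : Int) :
    ∀ (l : List Int) (i : Int),
      scanB num i l = i + ((l.takeWhile (fun x => decide (num < x))).length : Int) := by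
  intro l
  induction l with
  | nil => intro i; simp [scanB]
  | cons x xs ih =>
    intro i
    by_cases h : num < x
    · rw [scanB, if_pos h, ih, List.takeWhile_cons_of_pos (by simpa using h),
        List.length_cons]
      push_cast; ring
    · rw [scanB, if_neg h, List.takeWhile_cons_of_neg (by simpa using h)]
      simp

theorem takeWhile_char (num : Int) :
    ∀ (l : List Int),
      (∀ j : Nat, j < (l.takeWhile (fun x => decide (num < x))).length → num < l.getD j 0) ∧
      ((l.takeWhile (fun x => decide (num < x))).length < l.length →
        ¬ num < l.getD (l.takeWhile (fun x => decide (num < x))).length 0) := by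
  intro l
  induction l with
  | nil => simp
  | cons x xs ih =>
    by_cases h : num < x
    · rw [List.takeWhile_cons_of_pos (by simpa using h)]
      refine ⟨fun j hj => ?_, fun hlt => ?_⟩
      · cases j with
        | zero => simpa using h
        | succ j => exact ih.1 j (by simpa using hj)
      · simpa using ih.2 (by simpa using hlt)
    · rw [List.takeWhile_cons_of_neg (by simpa using h)]
      exact ⟨by simp, fun _ => by simpa using h⟩

theorem alt_isIns (a : List Int) (num : Int)
    (hs : List.Pairwise (fun x y => num < y → num < x) a) :
    IsIns a num (reversed_bisect_left_alt a num) := by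
  have hrun : reversed_bisect_left_alt a num
      = ((a.takeWhile (fun x => decide (num < x))).length : Int) := by
    rw [reversed_bisect_left_alt, scanB_eq]; ring
  set k := (a.takeWhile (fun x => decide (num < x))).length with hk
  have hkle : k ≤ a.length := (List.takeWhile_sublist _).length_le
  obtain ⟨hpref, hstop⟩ := takeWhile_char num a
  rw [hrun]
  refine ⟨by positivity, by exact_mod_cast hkle, ?_, ?_⟩
  · intro j hj; exact hpref j (by exact_mod_cast hj)
  · intro j hj hjl
    have hkj : k ≤ j := by exact_mod_cast hj
    have hklen : k < a.length := lt_of_le_of_lt hkj hjl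
    intro hlt
    exact hstop hklen (mono_getD a num hs hkj hjl hlt)

-- ===== VERDICT (by name: the statement is the Claim_ definition above) =====
theorem reversed_bisect_left_spec : Claim_equal_reversed_bisect_left := by
  intro a num _ hpre
  have hA : IsIns a num (reversed_bisect_left a num) := by
    rw [reversed_bisect_left]
    refine bsLoopA_isIns a num hpre _ 0 ((a.length : Int) - 1) le_rfl (by omega) (by omega)
      (by omega) (fun j hj => absurd hj (by omega)) (fun j hj hjl => absurd hjl (by omega))
  have hB : IsIns a num (reversed_bisect_left_alt a num) := alt_isIns a num hpre
  exact isIns_unique a num hA hB
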